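-- pv_equiv track=rewrite | github.com/rcchen0526/UVA | uva_455.py | check
-- ===== SOURCE A (Python) =====
-- def check(s, k):
--     for i in range(k):
--         j=k
--         while i+j<len(s):
--             if s[i]!=s[i+j]:
--                 return False
--             j+=k
--     return True
-- ===== SOURCE B (Python) =====
-- def check(s, k):
--     return all(s[i] == s[i + k] for i in range(len(s) - k))
-- ===== Notes on version B (the rewrite author's own statement) =====
-- stated objective: simpler
-- what changed: Replaces the nested residue-class loops (each class leader compared against every later member, with early returns) by a single flat pass comparing s[i] with s[i+k], equivalent by transitivity along each residue chain.
-- outside the precondition, e.g. on check('ab', -1): A returns True, B returns False; on check('ab', -5): A returns True, B raises IndexError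
import Mathlib
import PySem

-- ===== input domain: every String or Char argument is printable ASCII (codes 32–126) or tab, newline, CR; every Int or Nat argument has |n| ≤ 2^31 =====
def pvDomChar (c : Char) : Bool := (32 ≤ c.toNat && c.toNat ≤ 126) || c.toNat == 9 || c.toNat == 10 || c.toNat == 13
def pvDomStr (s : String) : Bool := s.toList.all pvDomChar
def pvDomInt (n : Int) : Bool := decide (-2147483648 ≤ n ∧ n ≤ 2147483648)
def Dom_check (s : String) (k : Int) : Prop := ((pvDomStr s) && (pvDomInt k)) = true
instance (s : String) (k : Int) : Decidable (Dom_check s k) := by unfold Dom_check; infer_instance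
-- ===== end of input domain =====

-- B replaces A's nested residue-class loops by one flat pass comparing s[i] with s[i+k] (simpler; equal by transitivity).

-- ===== PORT A =====
-- A's inner 'while i+j<len(s)' loop; fuel bounds the iteration count (≤ len(s) iterations when k ≥ 1,
-- which is the only way this is reached, since range(k) is empty otherwise) and makes the recursion structural.
def checkInnerA (cs : List Char) (i k : Int) : Int → Nat → Bool
  | _, 0 => true
  | j, fuel+1 =>
    if i + j < (cs.length : Int) then
      if PySem.List.pyGet? cs i ≠ PySem.List.pyGet? cs (i + j) then false
      else checkInnerA cs i k (j + k) fuel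
    else true

-- A's outer 'for i in range(k)' loop with the early 'return False' propagated out.
def checkOuterA (cs : List Char) (k : Int) : List Int → Bool
  | [] => true
  | i :: rest =>
    if checkInnerA cs i k k (cs.length + 1) then checkOuterA cs k rest else false

def check (s : String) (k : Int) : Bool :=
  checkOuterA s.toList k (PySem.List.pyRange 0 k 1)

-- ===== PORT B =====
def check_alt (s : String) (k : Int) : Bool :=
  (PySem.List.pyRange 0 ((s.toList.length : Int) - k) 1).all
    (fun i => PySem.List.pyGet? s.toList i == PySem.List.pyGet? s.toList (i + k))

-- ===== PRECONDITION & SPEC =====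
-- Pre_ excludes negative k (outside the natural domain of a period check): there A's empty range(k)
-- vacuously returns True while B's flat pass hits negative/out-of-range indices.
def Pre_check (s : String) (k : Int) : Prop := 0 ≤ k
instance (s : String) (k : Int) : Decidable (Pre_check s k) := by unfold Pre_check; infer_instance
def pvWitness_check : String × Int := ("abab", 2)

def Spec_check (s : String) (k : Int) (out : Bool) : Prop := out = check_alt s k
instance (s : String) (k : Int) (out : Bool) : Decidable (Spec_check s k out) := by unfold Spec_check; infer_instance

-- ===== CLAIM (what is proved, stated in full; the proofs are below) =====
def Claim_equal_check : Prop := ∀ (s : String) (k : Int), Dom_check s k → Pre_check s k → Spec_check s k (check s k)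

-- ===== LEMMAS AND PROOFS =====

-- The inner while loop succeeds iff every later member of i's residue chain matches s[i].
theorem checkInnerA_iff (cs : List Char) (i k : Int) (hk : 1 ≤ k) (_hi : 0 ≤ i) :
    ∀ (fuel : Nat) (j : Int), 0 ≤ j → (cs.length : Int) < i + j + fuel →
      (checkInnerA cs i k j fuel = true ↔
        ∀ t : Nat, i + j + t * k < (cs.length : Int) → PySem.List.pyGet? cs i = PySem.List.pyGet? cs (i + j + t * k)) := by
  intro fuel
  induction fuel with
  | zero =>
    intro j hj hfuel
    simp only [checkInnerA, true_iff]
    intro t ht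
    exfalso
    have : (0 : Int) ≤ (t : Int) * k := mul_nonneg (by positivity) (by omega)
    simp at hfuel; omega
  | succ n ih =>
    intro j hj hfuel
    simp only [checkInnerA]
    split_ifs with hlt heq
    · -- early return False
      constructor
      · intro h; exact absurd h (by simp)
      · intro h
        exfalso
        have h0 := h 0 (by simpa using hlt)
        simp at h0
        exact heq (by simpa using h0)
    · -- characters equal, recurse with j + k
      rw [not_ne_iff] at heq
      rw [ih (j + k) (by omega) (by push_cast at hfuel ⊢; omega)]
      constructor
      · intro h t ht
        cases t with
        | zero => simpa using heq
        | succ m =>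
          have e : i + (j + k) + (m : Int) * k = i + j + ((m + 1 : Nat) : Int) * k := by
            push_cast; ring
          have := h m (by rw [e]; exact ht)
          rwa [e] at this
      · intro h t ht
        have e : i + j + ((t + 1 : Nat) : Int) * k = i + (j + k) + (t : Int) * k := by
          push_cast; ring
        have := h (t + 1) (by rw [e]; exact ht)
        rwa [e] at this
    · -- i + j ≥ len: loop exits, chain is vacuous
      simp only [true_iff]
      intro t ht
      exfalso
      have : (0 : Int) ≤ (t : Int) * k := mul_nonneg (by positivity) (by omega)
      omega

theorem checkOuterA_iff (cs : List Char) (k : Int) :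
    ∀ l : List Int, (checkOuterA cs k l = true ↔
      ∀ i ∈ l, checkInnerA cs i k k (cs.length + 1) = true) := by
  intro l
  induction l with
  | nil => simp [checkOuterA]
  | cons x xs ih => simp only [checkOuterA]; split_ifs with h <;> simp [h, ih]

-- A = true ↔ every residue-class leader matches every later member of its chain (k ≥ 1).
theorem check_iff (s : String) (k : Int) (hk : 1 ≤ k) :
    check s k = true ↔
      ∀ i : Int, 0 ≤ i → i < k →
        ∀ t : Nat, i + k + t * k < (s.toList.length : Int) →
          PySem.List.pyGet? s.toList i = PySem.List.pyGet? s.toList (i + k + t * k) := by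
  unfold check
  rw [checkOuterA_iff]
  constructor
  · intro h i h0 hik t ht
    have hm : i ∈ PySem.List.pyRange 0 k 1 := by rw [PySem.List.mem_pyRange_one]; omega
    have := (checkInnerA_iff s.toList i k hk h0 (s.toList.length + 1) k (by omega)
      (by push_cast; omega)).mp (h i hm)
    exact this t ht
  · intro h i hm
    rw [PySem.List.mem_pyRange_one] at hm
    exact (checkInnerA_iff s.toList i k hk hm.1 (s.toList.length + 1) k (by omega)
      (by push_cast; omega)).mpr (h i hm.1 hm.2)

-- B = true ↔ every adjacent pair of period positions matches.
theorem check_alt_iff (s : String) (k : Int) :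
    check_alt s k = true ↔
      ∀ i : Int, 0 ≤ i → i + k < (s.toList.length : Int) →
        PySem.List.pyGet? s.toList i = PySem.List.pyGet? s.toList (i + k) := by
  unfold check_alt
  rw [List.all_eq_true]
  constructor
  · intro h i h0 hik
    have hm : i ∈ PySem.List.pyRange 0 ((s.toList.length : Int) - k) 1 := by
      rw [PySem.List.mem_pyRange_one]; omega
    simpa using h i hm
  · intro h i hm
    rw [PySem.List.mem_pyRange_one] at hm
    simpa using h i hm.1 (by omega)

-- Transitivity along each residue chain: the flat pass is equivalent to the nested classes (k ≥ 1).
theorem chains_iff_flat (cs : List Char) (k : Int) (hk : 1 ≤ k) :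
    (∀ i : Int, 0 ≤ i → i < k →
        ∀ t : Nat, i + k + t * k < (cs.length : Int) →
          PySem.List.pyGet? cs i = PySem.List.pyGet? cs (i + k + t * k)) ↔
      (∀ i : Int, 0 ≤ i → i + k < (cs.length : Int) →
          PySem.List.pyGet? cs i = PySem.List.pyGet? cs (i + k)) := by
  constructor
  · intro h i h0 hik
    set r := i % k with hr
    set q := i / k with hq
    have hrk : 0 ≤ r ∧ r < k := ⟨Int.emod_nonneg i (by omega), Int.emod_lt_of_pos i (by omega)⟩
    have hiq : k * q + r = i := Int.mul_ediv_add_emod i k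
    have hq0 : 0 ≤ q := Int.ediv_nonneg h0 (by omega)
    by_cases hq1 : q = 0
    · -- i = r < k: the adjacent pair is the first chain link (t = 0)
      have hi : i = r := by rw [hq1] at hiq; simpa using hiq.symm
      have := h i h0 (by omega) 0 (by push_cast; omega)
      simpa using this
    · -- q ≥ 1: chain from r to i (t = q-1) and from r to i+k (t = q)
      have hq2 : 1 ≤ q := by omega
      have e1 : r + k + ((q - 1).toNat : Int) * k = i := by
        rw [Int.toNat_of_nonneg (by omega)]; ring_nf; omega
      have e2 : r + k + (q.toNat : Int) * k = i + k := by
        rw [Int.toNat_of_nonneg (by omega)]; ring_nf; omega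
      have h1 := h r hrk.1 hrk.2 (q - 1).toNat (by rw [e1]; omega)
      have h2 := h r hrk.1 hrk.2 q.toNat (by rw [e2]; omega)
      rw [e1] at h1; rw [e2] at h2
      rw [← h1, h2]
  · intro h i h0 hik t
    induction t with
    | zero =>
      intro ht
      have := h i h0 (by push_cast at ht; omega)
      simpa using this
    | succ m ihm =>
      intro ht
      have hlt : i + k + (m : Int) * k < (cs.length : Int) := by push_cast at ht ⊢; nlinarith
      have h1 := ihm hlt
      have h2 := h (i + k + (m : Int) * k) (by nlinarith) (by push_cast at ht ⊢; ring_nf at ht ⊢; omega)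
      rw [h1, h2]
      congr 1
      push_cast; ring

theorem check_eq_alt (s : String) (k : Int) (hk : 0 ≤ k) : check s k = check_alt s k := by
  rcases eq_or_lt_of_le hk with hk0 | hk1
  · -- k = 0: A's outer range is empty; B compares every position with itself
    subst hk0
    have hA : check s 0 = true := by
      unfold check
      rw [PySem.List.pyRange_one_eq_nil (by omega)]
      rfl
    have hB : check_alt s 0 = true := by
      rw [check_alt_iff]
      intro i _ _
      simp
    rw [hA, hB]
  · rw [Bool.eq_iff_iff, check_iff s k (by omega), check_alt_iff]
    exact chains_iff_flat s.toList k (by omega)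

-- ===== VERDICT (by name: the statement is the Claim_ definition above) =====
theorem check_spec : Claim_equal_check := by
  intro s k _ hPre
  exact check_eq_alt s k hPre
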